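-- pv_equiv track=rewrite | github.com/JPmAn24/school-stuff | ramos_legacy.py | sel4
-- ===== SOURCE A (Python) =====
-- def sel4(n):
--     givn = 2
--     amm = 2
--     n -= 1
--     stri = "| 2 "
--     for i in range(n):
--         givn *= 2
--         amm += givn
--         stri += "| {} ".format(int(amm))
--     stri += "|"
--     return stri
-- ===== SOURCE B (Python) =====
-- def sel4(n):
--     m = n if n >= 1 else 1
--     terms = [str(2 ** (k + 2) - 2) for k in range(m)]
--     return "| " + " | ".join(terms) + " |"
-- ===== Notes on version B (the rewrite author's own statement) =====
-- stated objective: simpler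
-- what changed: Each token is computed directly from its index by the closed form 2**(k+2)-2 and the result is assembled with a single join, replacing A's running doubling accumulator and incremental string concatenation.
import Mathlib
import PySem

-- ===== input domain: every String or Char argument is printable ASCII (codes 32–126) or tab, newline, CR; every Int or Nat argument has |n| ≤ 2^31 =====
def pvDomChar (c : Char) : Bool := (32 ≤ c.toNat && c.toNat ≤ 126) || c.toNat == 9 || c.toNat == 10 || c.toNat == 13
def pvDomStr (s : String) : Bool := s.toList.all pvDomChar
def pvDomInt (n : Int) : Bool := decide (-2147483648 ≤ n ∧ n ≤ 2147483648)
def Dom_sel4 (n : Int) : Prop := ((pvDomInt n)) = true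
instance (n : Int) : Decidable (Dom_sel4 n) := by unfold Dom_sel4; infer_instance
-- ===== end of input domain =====

-- B computes each token directly by the closed form 2^(k+2)-2 and joins once, instead of A's running doubling accumulator with incremental concatenation; objective: simpler.


-- ===== PORT A =====
-- givn = 2; amm = 2; n -= 1; stri = "| 2 "; for i in range(n): givn *= 2; amm += givn; stri += "| {} ".format(int(amm));  stri += "|"
def sel4 (n : Int) : String :=
  let st := (PySem.List.pyRange 0 (n - 1) 1).foldl
    (fun (st : Int × Int × String) _i =>
      let givn := st.1 * 2
      let amm := st.2.1 + givn
      (givn, amm, st.2.2 ++ "| " ++ PySem.Int.toStr amm ++ " "))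
    (2, 2, "| 2 ")
  st.2.2 ++ "|"

-- ===== PORT B =====
-- m = n if n >= 1 else 1; terms = [str(2**(k+2)-2) for k in range(m)]; return "| " + " | ".join(terms) + " |"
def sel4_alt (n : Int) : String :=
  let m : Int := if n ≥ 1 then n else 1
  let terms := (PySem.List.pyRange 0 m 1).map
    (fun k => PySem.Int.toStr (2 ^ (k + 2).toNat - 2))
  "| " ++ PySem.Str.join " | " terms ++ " |"

-- ===== PRECONDITION & SPEC =====
def Spec_sel4 (n : Int) (out : String) : Prop := out = sel4_alt n
instance (n : Int) (out : String) : Decidable (Spec_sel4 n out) := by unfold Spec_sel4; infer_instance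

-- ===== CLAIM (what is proved, stated in full; the proofs are below) =====
def Claim_equal_sel4 : Prop := ∀ (n : Int), Dom_sel4 n → Spec_sel4 n (sel4 n)

-- ===== LEMMAS AND PROOFS =====

-- the k-th token (0-indexed) of the output
def pvTok (k : Nat) : String := PySem.Int.toStr ((2 : Int) ^ (k + 2) - 2)

-- A's accumulated string after k loop iterations
def pvStrA : Nat → String
  | 0 => "| 2 "
  | k + 1 => pvStrA k ++ "| " ++ PySem.Int.toStr ((2 : Int) ^ (k + 3) - 2) ++ " "

-- invariant of A's loop: state after L iterations
theorem pvStateA (L : Nat) :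
    (List.range L).foldl
      (fun (st : Int × Int × String) (_i : Nat) =>
        let givn := st.1 * 2
        let amm := st.2.1 + givn
        (givn, amm, st.2.2 ++ "| " ++ PySem.Int.toStr amm ++ " "))
      (2, 2, "| 2 ")
    = ((2 : Int) ^ (L + 1), (2 : Int) ^ (L + 2) - 2, pvStrA L) := by
  induction L with
  | zero => simp [pvStrA]
  | succ k ih =>
      rw [List.range_succ, List.foldl_append, ih]
      simp only [List.foldl_cons, List.foldl_nil]
      have h1 : (2:Int)^(k+1)*2 = 2^(k+1+1) := by ring
      have h2 : ((2:Int)^(k+2)-2) + (2:Int)^(k+1+1) = 2^(k+1+2)-2 := by ring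
      rw [h1, h2]
      simp [pvStrA]

theorem pvJoinSnoc (sep t : List Char) :
    ∀ ts : List (List Char), ts ≠ [] →
      PySem.Chars.join sep (ts ++ [t]) = PySem.Chars.join sep ts ++ sep ++ t := by
  intro ts
  induction ts with
  | nil => intro h; exact absurd rfl h
  | cons p rest ih =>
      intro _
      cases rest with
      | nil => simp [PySem.Chars.join_cons_cons, PySem.Chars.join_singleton]
      | cons q rest' =>
          have h1 : ((p :: q :: rest') ++ [t]) = p :: ((q :: rest') ++ [t]) := rfl
          have h2 : ((q :: rest') ++ [t]) = q :: (rest' ++ [t]) := rfl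
          rw [h1, h2, PySem.Chars.join_cons_cons, ← h2, ih (by simp), PySem.Chars.join_cons_cons]
          simp [List.append_assoc]

-- main bridge: A's string after L iterations + "|" equals B's framed join of L+1 tokens
theorem pvMain (L : Nat) :
    pvStrA L ++ "|" = "| " ++ PySem.Str.join " | " ((List.range (L + 1)).map pvTok) ++ " |" := by
  rw [← String.toList_inj]
  induction L with
  | zero =>
      simp only [pvStrA, String.toList_append, PySem.Str.toList_join]
      decide
  | succ k ih =>
      rw [List.range_succ, List.map_append]
      simp only [pvStrA, String.toList_append, PySem.Str.toList_join, List.map_append,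
        List.map_cons, List.map_nil] at ih ⊢
      rw [pvJoinSnoc _ _ _ (by simp)]
      have htok : PySem.Int.toStr ((2 : Int) ^ (k + 3) - 2) = pvTok (k + 1) := by
        unfold pvTok; norm_num
      rw [htok]
      simp only [List.append_assoc] at ih ⊢
      have h := congrArg (fun l => l ++ ([' '] ++ ((pvTok (k + 1)).toList ++ [' ', '|']))) ih
      simp only [List.append_assoc] at h
      simpa [List.append_assoc] using h

theorem pvAltEq (n : Int) :
    sel4_alt n = "| " ++ PySem.Str.join " | " ((List.range ((n - 1).toNat + 1)).map pvTok) ++ " |" := by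
  show "| " ++ PySem.Str.join " | " ((PySem.List.pyRange 0 (if n ≥ 1 then n else 1) 1).map
      (fun k => PySem.Int.toStr (2 ^ (k + 2).toNat - 2))) ++ " |" = _
  have hm : (if n ≥ 1 then n else 1) - 0 = ((n - 1).toNat + 1 : Nat) := by split <;> omega
  rw [PySem.List.pyRange_one, hm]
  simp only [Int.toNat_natCast, List.map_map]
  have hmap : List.map ((fun k : Int => PySem.Int.toStr (2 ^ (k + 2).toNat - 2)) ∘ fun k : Nat => (0 : Int) + ↑k)
      (List.range ((n - 1).toNat + 1)) = List.map pvTok (List.range ((n - 1).toNat + 1)) := by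
    apply List.map_congr_left
    intro k _
    simp only [Function.comp, pvTok]
    have he : ((0 : Int) + ↑k + 2).toNat = k + 2 := by omega
    rw [he]
  rw [hmap]

theorem sel4_eq (n : Int) : sel4 n = sel4_alt n := by
  show ((PySem.List.pyRange 0 (n - 1) 1).foldl
    (fun (st : Int × Int × String) _i =>
      let givn := st.1 * 2
      let amm := st.2.1 + givn
      (givn, amm, st.2.2 ++ "| " ++ PySem.Int.toStr amm ++ " "))
    (2, 2, "| 2 ")).2.2 ++ "|" = _
  rw [PySem.List.pyRange_one, List.foldl_map]
  simp only [sub_zero]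
  rw [pvStateA ((n - 1).toNat), pvAltEq]
  exact pvMain _

-- ===== VERDICT (by name: the statement is the Claim_ definition above) =====
theorem sel4_spec : Claim_equal_sel4 := by
  intro n _
  unfold Spec_sel4
  exact sel4_eq n
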